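-- pv_equiv track=rewrite | github.com/ZenilB/psych-test-project | psych-test-project/logic/depression_logic.py | get_depression_result
-- ===== SOURCE A (Python) =====
-- def get_depression_result(answers):
--     score = 0
--     for answer in answers:
--         if answer == 'A':  # Not at all
--             score += 0
--         elif answer == 'B':  # Several days
--             score += 1
--         elif answer == 'C':  # More than half the days
--             score += 2
--         elif answer == 'D':  # Nearly every day
--             score += 3
--
--     if score >= 21:
--         return "Severe Depression", score
--     elif score >= 15:
--         return "Moderate Depression", score
--     elif score >= 8:
--         return "Mild Depression", score
--     else:
--         return "Minimal Depression", score
-- ===== SOURCE B (Python) =====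
-- def get_depression_result(answers):
--     score = answers.count('B') + 2 * answers.count('C') + 3 * answers.count('D')
--     labels = ["Minimal Depression", "Mild Depression", "Moderate Depression", "Severe Depression"]
--     idx = sum(1 for t in (8, 15, 21) if score >= t)
--     return labels[idx], score
-- ===== Notes on version B (the rewrite author's own statement) =====
-- stated objective: simpler
-- what changed: Replaces the per-element 4-way branch accumulator with three count() tallies combined in one weighted expression, and the if/elif label chain with a threshold-count index into a label table.
import Mathlib
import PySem

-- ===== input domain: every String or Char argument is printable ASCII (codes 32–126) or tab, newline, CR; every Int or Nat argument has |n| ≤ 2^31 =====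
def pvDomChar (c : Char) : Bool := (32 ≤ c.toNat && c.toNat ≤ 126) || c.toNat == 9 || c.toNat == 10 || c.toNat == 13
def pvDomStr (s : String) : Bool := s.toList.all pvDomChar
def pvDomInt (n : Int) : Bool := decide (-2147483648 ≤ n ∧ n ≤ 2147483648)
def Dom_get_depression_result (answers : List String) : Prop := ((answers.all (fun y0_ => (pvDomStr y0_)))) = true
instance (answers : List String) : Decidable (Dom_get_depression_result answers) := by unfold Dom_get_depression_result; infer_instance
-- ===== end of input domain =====

-- B replaces the per-element 4-way branch with count() tallies + a weighted sum, and the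
-- if/elif label chain with a threshold-count index into a label table; objective: simpler.
-- ===== PORT A =====
def get_depression_result (answers : List String) : String × Int :=
  let score := answers.foldl (fun score answer =>
    if answer = "A" then score + 0
    else if answer = "B" then score + 1
    else if answer = "C" then score + 2
    else if answer = "D" then score + 3
    else score) (0 : Int)
  if score ≥ 21 then ("Severe Depression", score)
  else if score ≥ 15 then ("Moderate Depression", score)
  else if score ≥ 8 then ("Mild Depression", score)
  else ("Minimal Depression", score)

-- ===== PORT B =====
def get_depression_result_alt (answers : List String) : String × Int :=
  let score : Int := PySem.List.count answers "B" + 2 * PySem.List.count answers "C"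
      + 3 * PySem.List.count answers "D"
  let labels := ["Minimal Depression", "Mild Depression", "Moderate Depression", "Severe Depression"]
  let idx := (([8, 15, 21] : List Int).filter (fun t => score ≥ t)).length
  (labels.getD idx "", score)

-- ===== PRECONDITION & SPEC =====
def Spec_get_depression_result (answers : List String) (out : String × Int) : Prop := out = get_depression_result_alt answers
instance (answers : List String) (out : String × Int) : Decidable (Spec_get_depression_result answers out) := by unfold Spec_get_depression_result; infer_instance

-- ===== CLAIM (what is proved, stated in full; the proofs are below) =====
def Claim_equal_get_depression_result : Prop := ∀ (answers : List String), Dom_get_depression_result answers → Spec_get_depression_result answers (get_depression_result answers)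

-- ===== LEMMAS AND PROOFS =====

-- ===== VERDICT (by name: the statement is the Claim_ definition above) =====
lemma score_eq (answers : List String) (init : Int) :
    answers.foldl (fun score answer =>
      if answer = "A" then score + 0
      else if answer = "B" then score + 1
      else if answer = "C" then score + 2
      else if answer = "D" then score + 3
      else score) init
    = init + PySem.List.count answers "B" + 2 * PySem.List.count answers "C"
        + 3 * PySem.List.count answers "D" := by
  induction answers generalizing init with
  | nil => simp [PySem.List.count]
  | cons a tl ih =>
    simp only [List.foldl_cons, ih, PySem.List.count, List.count_cons]
    by_cases hA : a = "A" <;> by_cases hB : a = "B" <;> by_cases hC : a = "C" <;>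
      by_cases hD : a = "D" <;>
      simp_all [PySem.List.count, beq_iff_eq] <;> ring

theorem get_depression_result_spec : Claim_equal_get_depression_result := by
  intro answers _
  unfold Spec_get_depression_result get_depression_result get_depression_result_alt
  simp only [score_eq, zero_add]
  set s : Int := PySem.List.count answers "B" + 2 * PySem.List.count answers "C"
      + 3 * PySem.List.count answers "D" with hs
  by_cases h21 : s ≥ 21 <;> by_cases h15 : s ≥ 15 <;> by_cases h8 : s ≥ 8 <;>
    simp [h21, h15, h8, List.filter] <;> omega
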